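-- pv_equiv track=rewrite | github.com/numerodix/libutf8 | try.py | encode_char
-- ===== SOURCE A (Python) =====
-- def valid_byte(byte):
--     if 0xd800 <= byte <= 0xdfff:
--         raise Exception(byte)
--     if 0xfffe <= byte <= 0xffff:
--         raise Exception(byte)
--
-- def encode_char(num):
--     buf = []
--
--     # x??? ????
--     # 0111 1111
--     if num <= 0x7f:
--         by0 = num
--         buf.append(by0)
--
--     # xxx? ????  xx?? ????
--
--     # 0000 0111  1111 1111
--     # 110? ????  10?? ????
--     # xxx1 1111  xx11 1111
--     elif num <= 0x7ff:
--         by0 = 0b11000000 | (num >> 6)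
--         by1 = 0b10000000 | (num & 0b00111111)
--         buf.append(by0)
--         buf.append(by1)
--
--     # xxxx ????  xx?? ????  xx?? ????
--
--     # 0000 0000  1111 1111  1111 1111
--     # 1110 ????  10?? ????  10?? ????
--     # xxxx 1111  xx11 1111  xx11 1111
--     elif num <= 0xffff:
--         by0 = 0b11100000 | (num >> 12)
--         by1 = 0b10000000 | ((num >> 6) & 0b00111111)
--         by2 = 0b10000000 | (num & 0b00111111)
--         buf.append(by0)
--         buf.append(by1)
--         buf.append(by2)
--
--     # xxxx x???  xx?? ????  xx?? ????  xx?? ????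
--
--     # 0000 0000  0001 1111  1111 1111  1111 1111
--     # 1111 0???  10?? ????  10?? ????  10?? ????
--     # xxxx x111  xx11 1111  xx11 1111  xx11 1111
--     elif num <= 0x1fffff:
--         by0 = 0b11110000 | (num >> 18)
--         by1 = 0b10000000 | ((num >> 12) & 0b00111111)
--         by2 = 0b10000000 | ((num >> 6)  & 0b00111111)
--         by3 = 0b10000000 | (num & 0b00111111)
--         buf.append(by0)
--         buf.append(by1)
--         buf.append(by2)
--         buf.append(by3)
--
--     [valid_byte(b) for b in buf]
--
--     return buf
-- ===== SOURCE B (Python) =====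
-- def encode_char(num):
--     if num <= 0x7f:
--         return [num]
--     if num > 0x1fffff:
--         return []
--     tail = []
--     x, cap, prefix = num, 0x1f, 0xC0
--     while True:
--         x, low = divmod(x, 64)
--         tail.insert(0, 0x80 + low)
--         if x <= cap:
--             return [prefix + x] + tail
--         cap >>= 1
--         prefix = 0x80 | (prefix >> 1)
-- ===== Notes on version B (the rewrite author's own statement) =====
-- stated objective: alternative
-- what changed: Replaces A's four hand-unrolled range branches of shift/mask byte expressions by a base-64 divmod peeling loop that builds the continuation bytes back-to-front while shrinking the lead-byte capacity, with no precomputed byte count and no bitwise ops except the prefix update; the dead valid_byte comprehension is dropped since the produced bytes never reach its ranges.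
import Mathlib
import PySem

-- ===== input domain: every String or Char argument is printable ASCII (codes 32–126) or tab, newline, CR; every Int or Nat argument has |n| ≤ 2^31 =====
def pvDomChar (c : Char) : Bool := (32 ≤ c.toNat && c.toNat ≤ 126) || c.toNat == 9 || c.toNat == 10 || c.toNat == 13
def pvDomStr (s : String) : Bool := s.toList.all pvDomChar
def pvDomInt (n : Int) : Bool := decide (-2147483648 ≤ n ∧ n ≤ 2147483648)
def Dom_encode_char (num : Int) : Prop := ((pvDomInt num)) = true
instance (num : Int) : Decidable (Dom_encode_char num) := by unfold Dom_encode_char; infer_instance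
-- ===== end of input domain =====

-- B replaces A's four unrolled range branches by a divmod peeling loop: it repeatedly
-- divides by 64, prepending continuation bytes, until the quotient fits the shrinking
-- lead-byte capacity (objective: alternative; same values on every input).


-- ===== PORT A =====
-- A's trailing '[valid_byte(b) for b in buf]' is a pure check that raises only for bytes in
-- [0xd800,0xdfff] ∪ [0xfffe,0xffff]; every byte A ever puts in buf is ≤ 0xf7 or equals a
-- num ≤ 0x7f, so the check never fires: ported as this vacuous predicate, kept for fidelity.
def valid_byte_raises (byte : Int) : Bool :=
  decide ((0xd800 ≤ byte ∧ byte ≤ 0xdfff) ∨ (0xfffe ≤ byte ∧ byte ≤ 0xffff))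

-- Python's '>>' '&' '|' are core Lean's '>>>' and PySem.Int.band/bor (PYSEM.md).
def encode_char (num : Int) : List Int :=
  let buf : List Int := []
  let buf :=
    if num ≤ 0x7f then
      buf ++ [num]
    else if num ≤ 0x7ff then
      buf ++ [PySem.Int.bor 0b11000000 (num >>> 6)]
          ++ [PySem.Int.bor 0b10000000 (PySem.Int.band num 0b00111111)]
    else if num ≤ 0xffff then
      buf ++ [PySem.Int.bor 0b11100000 (num >>> 12)]
          ++ [PySem.Int.bor 0b10000000 (PySem.Int.band (num >>> 6) 0b00111111)]
          ++ [PySem.Int.bor 0b10000000 (PySem.Int.band num 0b00111111)]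
    else if num ≤ 0x1fffff then
      buf ++ [PySem.Int.bor 0b11110000 (num >>> 18)]
          ++ [PySem.Int.bor 0b10000000 (PySem.Int.band (num >>> 12) 0b00111111)]
          ++ [PySem.Int.bor 0b10000000 (PySem.Int.band (num >>> 6) 0b00111111)]
          ++ [PySem.Int.bor 0b10000000 (PySem.Int.band num 0b00111111)]
    else buf
  let _check := buf.map valid_byte_raises   -- the dead validation pass (never raises, see above)
  buf

-- ===== PORT B =====
-- Source B's 'while True' peeling loop; the fuel argument only makes it total (the loop body
-- runs at most 3 times for any input reaching it) and is never exhausted under the claim.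
def pvPeel : Nat → Int → Int → Int → List Int → List Int
  | 0, _, _, _, tail => tail
  | fuel + 1, x, cap, pfx, tail =>
    let q := PySem.Int.floordiv x 64
    let low := PySem.Int.mod x 64
    let tail' := (0x80 + low) :: tail        -- tail.insert(0, 0x80 + low)
    if q ≤ cap then (pfx + q) :: tail'       -- return [prefix + x] + tail
    else pvPeel fuel q (cap >>> 1) (PySem.Int.bor 0x80 (pfx >>> 1)) tail'

def encode_char_alt (num : Int) : List Int :=
  if num ≤ 0x7f then [num]
  else if num > 0x1fffff then []
  else pvPeel 4 num 0x1f 0xC0 []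

-- ===== PRECONDITION & SPEC =====
def Spec_encode_char (num : Int) (out : List Int) : Prop := out = encode_char_alt num
instance (num : Int) (out : List Int) : Decidable (Spec_encode_char num out) := by unfold Spec_encode_char; infer_instance

-- ===== CLAIM (what is proved, stated in full; the proofs are below) =====
def Claim_equal_encode_char : Prop := ∀ (num : Int), Dom_encode_char num → Spec_encode_char num (encode_char num)

-- ===== LEMMAS AND PROOFS =====
-- disjoint-bit ors really add (bounded facts, checked by decide)
lemma pvLor128 : ∀ r < 64, 128 ||| r = 128 + r := by decide
lemma pvLor192 : ∀ r < 32, 192 ||| r = 192 + r := by decide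
lemma pvLor224 : ∀ r < 16, 224 ||| r = 224 + r := by decide
lemma pvLor240 : ∀ r < 8, 240 ||| r = 240 + r := by decide

-- Nat core of a continuation byte: or-ing 0x80 onto a masked 6-bit group adds
lemma pvContNat (t : Nat) : 128 ||| (t &&& 63) = 128 + t % 64 := by
  have h := Nat.and_two_pow_sub_one_eq_mod t 6
  norm_num at h
  rw [h, pvLor128 _ (Nat.mod_lt _ (by norm_num))]

-- A's continuation bytes 0x80 | ((num >> j) & 63) equal B's 0x80 + (num / 64^(j/6)) % 64
lemma pvCont0 (m : Nat) :
    PySem.Int.bor 128 (PySem.Int.band (m : Int) 63) = 128 + ((m % 64 : Nat) : Int) := by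
  rw [show (63 : Int) = ((63 : Nat) : Int) from rfl, PySem.Int.band_natCast,
      show (128 : Int) = ((128 : Nat) : Int) from rfl, PySem.Int.bor_natCast, pvContNat]
  push_cast; ring

lemma pvCont6 (m : Nat) :
    PySem.Int.bor 128 (PySem.Int.band ((m : Int) >>> 6) 63) = 128 + ((m / 64 % 64 : Nat) : Int) := by
  have h1 : ((m : Int) >>> 6) = ((m >>> 6 : Nat) : Int) := by norm_cast
  rw [h1, show (63 : Int) = ((63 : Nat) : Int) from rfl, PySem.Int.band_natCast,
      show (128 : Int) = ((128 : Nat) : Int) from rfl, PySem.Int.bor_natCast, pvContNat]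
  have h2 : m >>> 6 = m / 64 := by rw [Nat.shiftRight_eq_div_pow]
  rw [h2]
  push_cast
  try ring

lemma pvCont12 (m : Nat) :
    PySem.Int.bor 128 (PySem.Int.band ((m : Int) >>> 12) 63) = 128 + ((m / 4096 % 64 : Nat) : Int) := by
  have h1 : ((m : Int) >>> 12) = ((m >>> 12 : Nat) : Int) := by norm_cast
  rw [h1, show (63 : Int) = ((63 : Nat) : Int) from rfl, PySem.Int.band_natCast,
      show (128 : Int) = ((128 : Nat) : Int) from rfl, PySem.Int.bor_natCast, pvContNat]
  have h2 : m >>> 12 = m / 4096 := by rw [Nat.shiftRight_eq_div_pow]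
  rw [h2]
  push_cast
  try ring

-- A's lead byte prefix | (num >> j) equals prefix + num / 2^j when the quotient fits
lemma pvLead (m j p b : Nat) (hb : m / 2 ^ j < b) (hadd : ∀ r < b, p ||| r = p + r) :
    PySem.Int.bor ((p : Nat) : Int) ((m : Int) >>> j) = ((p : Nat) : Int) + ((m / 2 ^ j : Nat) : Int) := by
  have h1 : ((m : Int) >>> j) = ((m >>> j : Nat) : Int) := by simp
  rw [h1, PySem.Int.bor_natCast, Nat.shiftRight_eq_div_pow, hadd _ hb]
  push_cast; ring

lemma pvLead192 (m : Nat) (h : m < 2048) :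
    PySem.Int.bor 192 ((m : Int) >>> 6) = 192 + ((m / 64 : Nat) : Int) := by
  have := pvLead m 6 192 32 (by omega) pvLor192
  norm_num at this; convert this using 3

lemma pvLead224 (m : Nat) (h : m < 65536) :
    PySem.Int.bor 224 ((m : Int) >>> 12) = 224 + ((m / 4096 : Nat) : Int) := by
  have := pvLead m 12 224 16 (by omega) pvLor224
  norm_num at this; convert this using 3

lemma pvLead240 (m : Nat) (h : m < 2097152) :
    PySem.Int.bor 240 ((m : Int) >>> 18) = 240 + ((m / 262144 : Nat) : Int) := by
  have := pvLead m 18 240 8 (by omega) pvLor240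
  norm_num at this; convert this using 3

-- floordiv/mod by the Int numeral 64 on a Nat cast (floordiv_natCast matches only a cast divisor)
lemma pvFd (m : Nat) : PySem.Int.floordiv ((m : Nat) : Int) 64 = ((m / 64 : Nat) : Int) := by
  exact_mod_cast PySem.Int.floordiv_natCast m 64

lemma pvMd (m : Nat) : PySem.Int.mod ((m : Nat) : Int) 64 = ((m % 64 : Nat) : Int) := by
  exact_mod_cast PySem.Int.mod_natCast m 64

-- ===== VERDICT (by name: the statement is the Claim_ definition above) =====
theorem encode_char_spec : Claim_equal_encode_char := by
  intro num _
  unfold Spec_encode_char encode_char encode_char_alt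
  by_cases h0 : num ≤ 0x7f
  · simp [h0]
  · obtain ⟨m, rfl⟩ : ∃ m : Nat, num = (m : Int) :=
      ⟨num.toNat, (Int.toNat_of_nonneg (by omega)).symm⟩
    have hm : 128 ≤ m := by exact_mod_cast by omega
    by_cases h3 : (m : Int) ≤ 0x1fffff
    case neg =>
      simp [h0, h3, show ¬ ((m : Int) ≤ 0xffff) by omega,
            show ¬ ((m : Int) ≤ 0x7ff) by omega, show (0x1fffff : Int) < m by omega]
    have hmle : m ≤ 0x1fffff := by exact_mod_cast h3
    by_cases h1 : (m : Int) ≤ 0x7ff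
    · -- two bytes
      have hmu : m < 2048 := by exact_mod_cast by omega
      have hq : ((m / 64 : Nat) : Int) ≤ 0x1f := by
        have : m / 64 ≤ 31 := by omega
        exact_mod_cast this
      simp only [if_neg h0, if_pos h1, if_pos h3,
        if_neg (show ¬ ((0x1fffff : Int) < (m : Int)) by omega),
        List.nil_append, List.cons_append,
        pvPeel, pvFd, pvMd, if_pos hq]
      rw [pvLead192 m hmu, pvCont0 m]
    · by_cases h2 : (m : Int) ≤ 0xffff
      · -- three bytes
        have hml : 2048 ≤ m := by
          have : ¬ (m ≤ 2047) := fun h => h1 (by exact_mod_cast h); omega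
        have hmu : m < 65536 := by exact_mod_cast by omega
        have hq1 : ¬ (((m / 64 : Nat) : Int) ≤ 0x1f) := by
          have : 32 ≤ m / 64 := by omega
          have : (32 : Int) ≤ ((m / 64 : Nat) : Int) := by exact_mod_cast this
          omega
        have hq2 : ((m / 64 / 64 : Nat) : Int) ≤ 0xf := by
          have : m / 64 / 64 ≤ 15 := by omega
          exact_mod_cast this
        simp only [if_neg h0, if_neg h1, if_pos h2, if_pos h3,
          if_neg (show ¬ ((0x1fffff : Int) < (m : Int)) by omega),
          List.nil_append, List.cons_append,
          pvPeel, pvFd, pvMd, if_neg hq1,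
          show ((0x1f : Int) >>> 1) = 0xf from rfl,
          show (PySem.Int.bor 0x80 ((0xC0 : Int) >>> 1)) = 0xE0 from rfl, if_pos hq2]
        rw [pvLead224 m hmu, pvCont6 m, pvCont0 m]
        norm_num [Nat.div_div_eq_div_mul]
      · -- four bytes
        have hml : 65536 ≤ m := by
          have : ¬ (m ≤ 65535) := fun h => h2 (by exact_mod_cast h); omega
        have hq1 : ¬ (((m / 64 : Nat) : Int) ≤ 0x1f) := by
          have : 1024 ≤ m / 64 := by omega
          have : (1024 : Int) ≤ ((m / 64 : Nat) : Int) := by exact_mod_cast this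
          omega
        have hq2 : ¬ (((m / 64 / 64 : Nat) : Int) ≤ 0xf) := by
          have : 16 ≤ m / 64 / 64 := by omega
          have : (16 : Int) ≤ ((m / 64 / 64 : Nat) : Int) := by exact_mod_cast this
          omega
        have hq3 : ((m / 64 / 64 / 64 : Nat) : Int) ≤ 0x7 := by
          have : m / 64 / 64 / 64 ≤ 7 := by omega
          exact_mod_cast this
        simp only [if_neg h0, if_neg h1, if_neg h2, if_pos h3,
          if_neg (show ¬ ((0x1fffff : Int) < (m : Int)) by omega),
          List.nil_append, List.cons_append,
          pvPeel, pvFd, pvMd, if_neg hq1, if_neg hq2,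
          show ((0x1f : Int) >>> 1) = 0xf from rfl,
          show ((0xf : Int) >>> 1) = 0x7 from rfl,
          show (PySem.Int.bor 0x80 ((0xC0 : Int) >>> 1)) = 0xE0 from rfl,
          show (PySem.Int.bor 0x80 ((0xE0 : Int) >>> 1)) = 0xF0 from rfl, if_pos hq3]
        rw [pvLead240 m (by omega), pvCont12 m, pvCont6 m, pvCont0 m]
        norm_num [Nat.div_div_eq_div_mul]
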